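-- pv_equiv track=rewrite | github.com/Haider8/python-webapp2 | month.py | valid_month
-- ===== SOURCE A (Python) =====
-- months = ['January',
--           'February',
--           'March',
--           'April',
--           'May',
--           'June',
--           'July',
--           'August',
--           'September',
--           'October',
--           'November',
--           'December']
--
-- month_abbvs = dict((m[:3].lower(), m) for m in months)
--
-- def valid_month(month):
--     short_month = month[:3].lower()
--     new_month = month_abbvs.get(short_month)
--     for i in range(0, 12):
--         if months[i] == new_month:
--             return True
--             break
--         elif i == 11:
--             return False
-- ===== SOURCE B (Python) =====
-- MONTH_ABBRS = frozenset(
--     ["jan", "feb", "mar", "apr", "may", "jun",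
--      "jul", "aug", "sep", "oct", "nov", "dec"])
--
-- def valid_month(month):
--     return month[:3].lower() in MONTH_ABBRS
-- ===== Notes on version B (the rewrite author's own statement) =====
-- stated objective: simpler
-- what changed: B drops the months list, the abbreviation dict and both loops entirely: it tests the lowered 3-letter prefix directly for membership in a literal frozenset of the twelve abbreviations, correct because the abbreviations are exactly the keys A's dict maps to full names that its scan then finds.
import Mathlib
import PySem

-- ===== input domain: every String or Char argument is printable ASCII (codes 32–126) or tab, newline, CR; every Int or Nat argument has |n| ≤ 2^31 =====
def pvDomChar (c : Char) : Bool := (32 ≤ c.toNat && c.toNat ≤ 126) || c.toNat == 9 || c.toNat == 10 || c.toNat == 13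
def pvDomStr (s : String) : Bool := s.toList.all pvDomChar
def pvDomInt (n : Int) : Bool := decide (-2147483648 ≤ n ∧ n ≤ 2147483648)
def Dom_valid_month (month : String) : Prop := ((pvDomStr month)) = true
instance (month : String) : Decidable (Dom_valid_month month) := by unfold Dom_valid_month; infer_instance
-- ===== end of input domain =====

-- B drops the months list, dict and loops: one membership test of the lowered prefix in a literal set of abbreviations (objective: simpler).

-- ===== PORT A =====
def monthsA : List String :=
  ["January", "February", "March", "April", "May", "June",
   "July", "August", "September", "October", "November", "December"]

-- month_abbvs = dict((m[:3].lower(), m) for m in months)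
def month_abbvs : PySem.Dict String String :=
  PySem.Dict.ofList (monthsA.map (fun m => (PySem.Str.lower (PySem.Str.slice m none (some 3)), m)))

-- the 'for i in range(0, 12)' loop of A, step for step
def loopA (new_month : Option String) : List Int → Bool
  | [] => false   -- unreachable in A (the i == 11 branch fires first)
  | i :: rest =>
    if PySem.List.pyGet? monthsA i == new_month then true
    else if i == (11 : Int) then false
    else loopA new_month rest

def valid_month (month : String) : Bool :=
  let short_month := PySem.Str.lower (PySem.Str.slice month none (some 3))
  let new_month := month_abbvs.get? short_month
  loopA new_month (PySem.List.pyRange 0 12 1)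

-- ===== PORT B =====
-- MONTH_ABBRS = frozenset([...])
def MONTH_ABBRS : PySem.Set String :=
  PySem.Set.ofList ["jan", "feb", "mar", "apr", "may", "jun",
                    "jul", "aug", "sep", "oct", "nov", "dec"]

def valid_month_alt (month : String) : Bool :=
  PySem.Set.contains MONTH_ABBRS (PySem.Str.lower (PySem.Str.slice month none (some 3)))

-- ===== PRECONDITION & SPEC =====
def Spec_valid_month (month : String) (out : Bool) : Prop := out = valid_month_alt month
instance (month : String) (out : Bool) : Decidable (Spec_valid_month month out) := by unfold Spec_valid_month; infer_instance

-- ===== CLAIM (what is proved, stated in full; the proofs are below) =====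
def Claim_equal_valid_month : Prop := ∀ (month : String), Dom_valid_month month → Spec_valid_month month (valid_month month)

-- ===== LEMMAS AND PROOFS =====

def abbvs : List String :=
  ["jan", "feb", "mar", "apr", "may", "jun", "jul", "aug", "sep", "oct", "nov", "dec"]

theorem month_abbvs_eval :
    month_abbvs = PySem.Dict.mk
      [("jan", "January"), ("feb", "February"), ("mar", "March"), ("apr", "April"),
       ("may", "May"), ("jun", "June"), ("jul", "July"), ("aug", "August"),
       ("sep", "September"), ("oct", "October"), ("nov", "November"), ("dec", "December")] := by
  decide

theorem range12_eval :
    PySem.List.pyRange 0 12 1 = [0, 1, 2, 3, 4, 5, 6, 7, 8, 9, 10, 11] := by decide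

-- both sides depend on the input only through the lowered 3-letter prefix p
theorem key (p : String) :
    loopA (month_abbvs.get? p) (PySem.List.pyRange 0 12 1)
      = PySem.Set.contains MONTH_ABBRS p := by
  by_cases hp : p ∈ abbvs
  · simp only [abbvs, List.mem_cons, List.not_mem_nil, or_false] at hp
    rcases hp with h | h | h | h | h | h | h | h | h | h | h | h <;> subst h <;> decide
  · simp only [abbvs, List.mem_cons, List.not_mem_nil, or_false, not_or] at hp
    obtain ⟨h1, h2, h3, h4, h5, h6, h7, h8, h9, h10, h11, h12⟩ := hp
    have hget : month_abbvs.get? p = none := by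
      rw [month_abbvs_eval]
      simp [PySem.Dict.get?,
        Ne.symm h1, Ne.symm h2, Ne.symm h3, Ne.symm h4, Ne.symm h5, Ne.symm h6,
        Ne.symm h7, Ne.symm h8, Ne.symm h9, Ne.symm h10, Ne.symm h11, Ne.symm h12]
    have hmem : PySem.Set.contains MONTH_ABBRS p = false := by
      simp only [MONTH_ABBRS, PySem.Set.contains, PySem.Set.ofList]
      simp
      exact ⟨h1, h2, h3, h4, h5, h6, h7, h8, h9, h10, h11, h12⟩
    rw [hget, hmem, range12_eval]
    decide

-- ===== VERDICT (by name: the statement is the Claim_ definition above) =====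
theorem valid_month_spec : Claim_equal_valid_month := by
  intro month _
  unfold Spec_valid_month valid_month valid_month_alt
  exact key _
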